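-- pv_equiv track=rewrite | github.com/lesleslie/session-buddy | session_buddy/adapters/knowledge_graph_phase3_patch.py | _infer_transitive_type
-- ===== SOURCE A (Python) =====
-- def _infer_transitive_type(types: list[str]) -> str:
--     """Infer transitive relationship type from chain of types."""
--     if not types:
--         return "related_to"
--
--     priority = [
--         "uses",
--         "depends_on",
--         "extends",
--         "implements",
--         "part_of",
--         "connects_to",
--         "similar_to",
--         "very_similar_to",
--         "related_to",
--     ]
--
--     for rel_type in priority:
--         if rel_type in types:
--             return rel_type
--
--     return types[0]
-- ===== SOURCE B (Python) =====
-- def _infer_transitive_type(types: list[str]) -> str: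
--     """Infer transitive relationship type from chain of types."""
--     if not types:
--         return "related_to"
--
--     priority = [
--         "uses",
--         "depends_on",
--         "extends",
--         "implements",
--         "part_of",
--         "connects_to",
--         "similar_to",
--         "very_similar_to",
--         "related_to",
--     ]
--
--     rank = {t: i for i, t in enumerate(priority)}
--     return min(types, key=lambda t: rank.get(t, len(priority)))
-- ===== Notes on version B (the rewrite author's own statement) =====
-- stated objective: idiomatic
-- what changed: Instead of scanning the priority list and testing membership in types for each entry (early-returning on the first hit), B builds a rank dictionary once and takes min(types, key=rank), a single pass over types with O(1) lookups.
import Mathlib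
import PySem

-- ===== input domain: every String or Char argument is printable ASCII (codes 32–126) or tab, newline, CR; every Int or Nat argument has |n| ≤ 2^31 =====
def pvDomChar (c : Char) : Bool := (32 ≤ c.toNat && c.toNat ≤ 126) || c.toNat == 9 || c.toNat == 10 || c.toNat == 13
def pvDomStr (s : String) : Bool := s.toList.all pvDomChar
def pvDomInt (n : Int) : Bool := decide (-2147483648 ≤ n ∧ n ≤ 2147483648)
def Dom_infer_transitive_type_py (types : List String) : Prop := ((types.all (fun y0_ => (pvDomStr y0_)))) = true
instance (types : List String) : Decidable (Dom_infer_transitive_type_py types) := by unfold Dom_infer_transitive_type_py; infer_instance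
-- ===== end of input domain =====

-- B replaces A's priority-list scan with membership tests by a rank dictionary and a
-- single min-by-rank pass over `types` (idiomatic; same exact results).


-- the `priority` local list (shared literal of both Pythons)
def pvPRI : List String :=
  ["uses", "depends_on", "extends", "implements", "part_of",
   "connects_to", "similar_to", "very_similar_to", "related_to"]

-- ===== PORT A =====
-- A's `for rel_type in priority: if rel_type in types: return rel_type` loop
def pvScanA (ps : List String) (types : List String) : Option String :=
  match ps with
  | [] => none
  | p :: rest => if types.contains p then some p else pvScanA rest types

def infer_transitive_type_py (types : List String) : String :=
  match types with
  | [] => "related_to"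
  | t0 :: _ =>
    match pvScanA pvPRI types with
    | some p => p
    | none => t0          -- `return types[0]` (types nonempty here)

-- ===== PORT B =====
-- `rank = {t: i for i, t in enumerate(priority)}`
def pvRankDict : PySem.Dict String Int :=
  PySem.Dict.ofList ((PySem.List.enumerate pvPRI 0).map fun p => (p.2, p.1))

-- the key function `lambda t: rank.get(t, len(priority))`
def pvKey (t : String) : Int := pvRankDict.getD t 9

-- `min(types, key=pvKey)`: left-to-right, replace current best only on strictly smaller key
def pvMinBy (best : String) (rest : List String) : String :=
  match rest with
  | [] => best
  | t :: ts => if pvKey t < pvKey best then pvMinBy t ts else pvMinBy best ts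

def infer_transitive_type_py_alt (types : List String) : String :=
  match types with
  | [] => "related_to"
  | t0 :: ts => pvMinBy t0 ts

-- ===== PRECONDITION & SPEC =====
def Spec_infer_transitive_type_py (types : List String) (out : String) : Prop := out = infer_transitive_type_py_alt types
instance (types : List String) (out : String) : Decidable (Spec_infer_transitive_type_py types out) := by unfold Spec_infer_transitive_type_py; infer_instance

-- ===== CLAIM (what is proved, stated in full; the proofs are below) =====
def Claim_equal_infer_transitive_type_py : Prop := ∀ (types : List String), Dom_infer_transitive_type_py types → Spec_infer_transitive_type_py types (infer_transitive_type_py types)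

-- ===== LEMMAS AND PROOFS =====

lemma pvRankDict_eq : pvRankDict = PySem.Dict.mk
    [("uses", (0:Int)), ("depends_on", 1), ("extends", 2), ("implements", 3), ("part_of", 4),
     ("connects_to", 5), ("similar_to", 6), ("very_similar_to", 7), ("related_to", 8)] := by
  decide

lemma pvKey_not_mem {t : String} (h : t ∉ pvPRI) : pvKey t = 9 := by
  simp only [pvPRI, List.mem_cons, List.not_mem_nil, or_false, not_or] at h
  obtain ⟨h1, h2, h3, h4, h5, h6, h7, h8, h9⟩ := h
  simp [pvKey, pvRankDict_eq, PySem.Dict.getD,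
    Ne.symm h1, Ne.symm h2, Ne.symm h3, Ne.symm h4, Ne.symm h5,
    Ne.symm h6, Ne.symm h7, Ne.symm h8, Ne.symm h9, PySem.Dict.get?]

lemma pvKey_le (t : String) : pvKey t ≤ 9 := by
  by_cases h : t ∈ pvPRI
  · simp only [pvPRI, List.mem_cons, List.not_mem_nil, or_false] at h
    rcases h with h|h|h|h|h|h|h|h|h <;> subst h <;> decide
  · rw [pvKey_not_mem h]

-- every string either has the default key 9 (not a priority), or is pvPRI[k] with key k
lemma pvKey_spec (t : String) :
    (t ∉ pvPRI ∧ pvKey t = 9) ∨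
    ∃ k : Nat, ∃ hk : k < pvPRI.length, pvPRI[k] = t ∧ pvKey t = (k : Int) := by
  by_cases h : t ∈ pvPRI
  · right
    simp only [pvPRI, List.mem_cons, List.not_mem_nil, or_false] at h
    rcases h with h|h|h|h|h|h|h|h|h <;> subst h
    · exact ⟨0, by decide, by decide, by decide⟩
    · exact ⟨1, by decide, by decide, by decide⟩
    · exact ⟨2, by decide, by decide, by decide⟩
    · exact ⟨3, by decide, by decide, by decide⟩
    · exact ⟨4, by decide, by decide, by decide⟩
    · exact ⟨5, by decide, by decide, by decide⟩
    · exact ⟨6, by decide, by decide, by decide⟩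
    · exact ⟨7, by decide, by decide, by decide⟩
    · exact ⟨8, by decide, by decide, by decide⟩
  · exact Or.inl ⟨h, pvKey_not_mem h⟩

lemma pvScanA_none {ps types : List String} (h : pvScanA ps types = none) :
    ∀ p ∈ ps, p ∉ types := by
  induction ps with
  | nil => simp
  | cons p rest ih =>
    intro q hq
    unfold pvScanA at h
    by_cases hc : types.contains p = true
    · rw [if_pos hc] at h; exact absurd h (by simp)
    · rw [if_neg hc] at h
      rcases List.mem_cons.mp hq with rfl | hq'
      · simpa using hc
      · exact ih h q hq'

lemma pvScanA_some {ps types : List String} {p : String} (h : pvScanA ps types = some p) :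
    ∃ pre suf, ps = pre ++ p :: suf ∧ p ∈ types ∧ ∀ q ∈ pre, q ∉ types := by
  induction ps with
  | nil => simp [pvScanA] at h
  | cons a rest ih =>
    unfold pvScanA at h
    by_cases hc : types.contains a = true
    · rw [if_pos hc] at h
      obtain rfl := Option.some.inj h
      exact ⟨[], rest, rfl, by simpa using hc, by simp⟩
    · rw [if_neg hc] at h
      obtain ⟨pre, suf, hps, hp, hpre⟩ := ih h
      refine ⟨a :: pre, suf, by simp [hps], hp, ?_⟩
      intro q hq
      rcases List.mem_cons.mp hq with rfl | hq'
      · simpa using hc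
      · exact hpre q hq'

lemma pvMinBy_mem (best : String) (rest : List String) :
    pvMinBy best rest ∈ best :: rest := by
  induction rest generalizing best with
  | nil => simp [pvMinBy]
  | cons t ts ih =>
    unfold pvMinBy
    by_cases hlt : pvKey t < pvKey best
    · simp only [hlt, if_true]
      have := ih t
      simp only [List.mem_cons] at this ⊢
      tauto
    · simp only [hlt, if_false]
      have := ih best
      simp only [List.mem_cons] at this ⊢
      tauto

lemma pvMinBy_min : ∀ (rest : List String) (best : String),
    ∀ x ∈ best :: rest, pvKey (pvMinBy best rest) ≤ pvKey x := by
  intro rest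
  induction rest with
  | nil =>
    intro best x hx
    rw [List.mem_singleton] at hx
    subst hx
    exact le_of_eq rfl
  | cons t ts ih =>
    intro best x hx
    unfold pvMinBy
    by_cases hlt : pvKey t < pvKey best
    · simp only [hlt, if_true]
      rcases List.mem_cons.mp hx with rfl | hx'
      · exact le_of_lt (lt_of_le_of_lt (ih t t (by simp)) hlt)
      · exact ih t x (by simpa using hx')
    · simp only [hlt, if_false]
      rcases List.mem_cons.mp hx with rfl | hx'
      · exact ih x x (by simp)
      rcases List.mem_cons.mp hx' with rfl | hx''
      · exact le_trans (ih best best (by simp)) (le_of_not_gt hlt)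
      · exact ih best x (by simp [hx''])

lemma pvMinBy_all_eq (best : String) (rest : List String)
    (h : ∀ x ∈ rest, pvKey best ≤ pvKey x) : pvMinBy best rest = best := by
  induction rest with
  | nil => rfl
  | cons t ts ih =>
    unfold pvMinBy
    have hbt : ¬ pvKey t < pvKey best := not_lt.mpr (h t (by simp))
    simp only [hbt, if_false]
    exact ih (fun x hx => h x (by simp [hx]))

-- keys below 9 are injective: both strings are the same pvPRI entry
lemma pvKey_inj {x y : String} (hxy : pvKey x = pvKey y) (hlt : pvKey x < 9) : x = y := by
  rcases pvKey_spec x with ⟨_, hx9⟩ | ⟨kx, hkx, hgx, hkey_x⟩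
  · omega
  rcases pvKey_spec y with ⟨_, hy9⟩ | ⟨ky, hky, hgy, hkey_y⟩
  · omega
  have : kx = ky := by omega
  subst this
  rw [← hgx, ← hgy]

theorem infer_transitive_type_py_spec_aux (types : List String) :
    infer_transitive_type_py types = infer_transitive_type_py_alt types := by
  match types with
  | [] => rfl
  | t0 :: ts =>
    unfold infer_transitive_type_py infer_transitive_type_py_alt
    cases hscan : pvScanA pvPRI (t0 :: ts) with
    | none =>
      -- nothing from the priority list occurs in types: all keys are 9, min is t0
      have hnone := pvScanA_none hscan
      have hall : ∀ x ∈ t0 :: ts, pvKey x = 9 := by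
        intro x hx
        refine pvKey_not_mem (fun hmem => hnone x hmem hx)
      simp only
      exact (pvMinBy_all_eq t0 ts (fun x hx => by
        rw [hall x (by simp [hx]), hall t0 (by simp)])).symm
    | some p =>
      obtain ⟨pre, suf, hps, hpty, hpre⟩ := pvScanA_some hscan
      -- p = pvPRI[pre.length], so pvKey p = pre.length < 9
      have hlen : pre.length < pvPRI.length := by
        rw [hps]; simp
      have hgetp : pvPRI[pre.length]'hlen = p := by
        rw [List.getElem_of_eq hps hlen,
            List.getElem_append_right (Nat.le_refl _)]
        simp
      -- the key of p
      rcases pvKey_spec p with ⟨hnm, _⟩ | ⟨kp, hkp, hgp, hkeyp⟩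
      · exact absurd (hgetp ▸ List.getElem_mem hlen) hnm
      have hnodup : pvPRI.Nodup := by decide
      have hkpe : kp = pre.length := by
        have h12 : pvPRI[kp]'hkp = pvPRI[pre.length]'hlen := by rw [hgp, hgetp]
        exact (List.Nodup.getElem_inj_iff hnodup).mp h12
      -- p's key is minimal over types
      have hmin : ∀ x ∈ t0 :: ts, pvKey p ≤ pvKey x := by
        intro x hx
        by_contra hxp
        rw [not_le] at hxp
        rcases pvKey_spec x with ⟨_, hx9⟩ | ⟨kx, hkx, hgx, hkeyx⟩
        · have := pvKey_le p; omega
        · have hkxlt : kx < pre.length := by omega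
          have hxpre : x ∈ pre := by
            have h2 : pvPRI[kx]'hkx = pre[kx]'hkxlt := by
              rw [List.getElem_of_eq hps hkx]
              exact List.getElem_append_left hkxlt
            rw [← hgx, h2]
            exact List.getElem_mem _
          exact hpre x hxpre hx
      -- B's result has the same (minimal) key, hence equals p
      set y := pvMinBy t0 ts with hy
      have hymem : y ∈ t0 :: ts := pvMinBy_mem t0 ts
      have hyle : pvKey y ≤ pvKey p := pvMinBy_min ts t0 p hpty
      have hpley : pvKey p ≤ pvKey y := hmin y hymem
      have hkeq : pvKey p = pvKey y := le_antisymm hpley hyle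
      have hk9 : kp < 9 := by simpa [pvPRI] using hkp
      have hplt : pvKey p < 9 := by
        rw [hkeyp]; exact_mod_cast hk9
      simp only
      exact pvKey_inj hkeq hplt

-- ===== VERDICT (by name: the statement is the Claim_ definition above) =====
theorem infer_transitive_type_py_spec : Claim_equal_infer_transitive_type_py := by
  intro types _
  exact infer_transitive_type_py_spec_aux types
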